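-- pv_equiv track=rewrite | github.com/srghma/SoniTranslate | soni_translate/translation_cache.py | create_translation_mapping
-- ===== SOURCE A (Python) =====
-- from typing import List, Dict, Optional, Tuple
--
-- def create_translation_mapping(
--     segments: List[Dict],
--     cached_translations: Dict[str, str],
--     new_translations: List[str]
-- ) -> Dict[str, str]:
--     """Create a mapping from original text to translation."""
--     translation_mapping = cached_translations.copy()
--
--     # Get unique non-empty texts that need translation
--     texts_needing_translation = []
--     for segment in segments:
--         text = segment.get('text', '').strip()
--         if text and text not in cached_translations:
--             texts_needing_translation.append(text)
--
--     # Remove duplicates while preserving order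
--     unique_texts_needing_translation = list(dict.fromkeys(texts_needing_translation))
--
--     # Map new translations
--     for i, text in enumerate(unique_texts_needing_translation):
--         if i < len(new_translations):
--             translation_mapping[text] = new_translations[i]
--
--     return translation_mapping
-- ===== SOURCE B (Python) =====
-- def create_translation_mapping(segments, cached_translations, new_translations):
--     """Create a mapping from original text to translation."""
--     mapping = cached_translations.copy()
--     seen = set()
--     j = 0
--     for segment in segments:
--         text = segment.get('text', '').strip()
--         if text and text not in cached_translations and text not in seen:
--             seen.add(text)
--             if j < len(new_translations):
--                 mapping[text] = new_translations[j]
--             j += 1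
--     return mapping
-- ===== Notes on version B (the rewrite author's own statement) =====
-- stated objective: simpler
-- what changed: Replaces the three sequential passes (collect texts, dict.fromkeys dedup, enumerate-indexed assignment) with one loop over segments maintaining a seen-set and a counter, assigning each new unique text its translation immediately.
import Mathlib
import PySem

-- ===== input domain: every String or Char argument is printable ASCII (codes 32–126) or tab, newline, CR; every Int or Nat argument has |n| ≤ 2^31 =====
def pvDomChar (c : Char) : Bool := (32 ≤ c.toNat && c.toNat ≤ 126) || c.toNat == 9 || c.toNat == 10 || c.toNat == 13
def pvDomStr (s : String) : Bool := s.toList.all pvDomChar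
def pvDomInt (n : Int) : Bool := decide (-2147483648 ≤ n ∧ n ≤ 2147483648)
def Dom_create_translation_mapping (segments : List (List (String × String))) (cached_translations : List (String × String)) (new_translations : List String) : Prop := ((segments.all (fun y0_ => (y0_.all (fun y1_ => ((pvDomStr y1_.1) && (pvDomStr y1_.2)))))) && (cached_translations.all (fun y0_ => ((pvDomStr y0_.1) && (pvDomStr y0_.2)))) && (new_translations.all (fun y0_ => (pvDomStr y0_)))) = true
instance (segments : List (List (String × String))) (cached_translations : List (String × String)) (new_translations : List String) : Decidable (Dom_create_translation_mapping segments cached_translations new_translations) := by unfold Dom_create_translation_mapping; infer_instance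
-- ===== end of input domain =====

-- B replaces A's three sequential passes by a single loop with a seen-set and a counter (objective: simpler).

-- ===== PORT A =====
def create_translation_mapping (segments : List (List (String × String))) (cached_translations : List (String × String)) (new_translations : List String) : List (String × String) :=
  let cachedD := PySem.Dict.ofList cached_translations
  let translation_mapping := cachedD
  let texts_needing_translation := segments.foldl (fun acc segment =>
      if (PySem.Str.strip ((PySem.Dict.ofList segment).getD "text" "") != "") &&
         !(cachedD.contains (PySem.Str.strip ((PySem.Dict.ofList segment).getD "text" ""))) then
        acc ++ [PySem.Str.strip ((PySem.Dict.ofList segment).getD "text" "")]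
      else acc) []
  let unique_texts_needing_translation := PySem.List.dedup texts_needing_translation
  let final := (PySem.List.enumerate unique_texts_needing_translation).foldl (fun m p =>
      if p.1 < (new_translations.length : Int) then
        m.insert p.2 (PySem.List.pyGetD new_translations p.1 "")
      else m) translation_mapping
  final.items

-- ===== PORT B =====
def create_translation_mapping_alt (segments : List (List (String × String))) (cached_translations : List (String × String)) (new_translations : List String) : List (String × String) :=
  let cachedD := PySem.Dict.ofList cached_translations
  let st := segments.foldl (fun (st : PySem.Dict String String × PySem.Set String × Nat) segment =>
      let text := PySem.Str.strip ((PySem.Dict.ofList segment).getD "text" "")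
      if (text != "") && !(cachedD.contains text) && !(st.2.1.contains text) then
        (if st.2.2 < new_translations.length then
           st.1.insert text (new_translations.getD st.2.2 "")
         else st.1,
         st.2.1.add text, st.2.2 + 1)
      else st) (cachedD, PySem.Set.empty, 0)
  st.1.items

-- ===== PRECONDITION & SPEC =====
def Spec_create_translation_mapping (segments : List (List (String × String))) (cached_translations : List (String × String)) (new_translations : List String) (out : List (String × String)) : Prop := out = create_translation_mapping_alt segments cached_translations new_translations
instance (segments : List (List (String × String))) (cached_translations : List (String × String)) (new_translations : List String) (out : List (String × String)) : Decidable (Spec_create_translation_mapping segments cached_translations new_translations out) := by unfold Spec_create_translation_mapping; infer_instance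

-- ===== CLAIM (what is proved, stated in full; the proofs are below) =====
def Claim_equal_create_translation_mapping : Prop := ∀ (segments : List (List (String × String))) (cached_translations : List (String × String)) (new_translations : List String), Dom_create_translation_mapping segments cached_translations new_translations → Spec_create_translation_mapping segments cached_translations new_translations (create_translation_mapping segments cached_translations new_translations)

-- ===== LEMMAS AND PROOFS =====

-- the common shape: assign new_translations[j], new_translations[j+1], ... to the texts of u in order
def pvApplyIdx (new : List String) (m : PySem.Dict String String) (u : List String) (j : Nat) : PySem.Dict String String :=
  match u with
  | [] => m
  | t :: ts => pvApplyIdx new (if j < new.length then m.insert t (new.getD j "") else m) ts (j + 1)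

-- the stripped text a segment contributes
def pvText (segment : List (String × String)) : String :=
  PySem.Str.strip ((PySem.Dict.ofList segment).getD "text" "")

-- A's filter condition
def pvP (cachedD : PySem.Dict String String) (seg : List (String × String)) : Bool :=
  (pvText seg != "") && !(cachedD.contains (pvText seg))

theorem pvEnum_foldl (new : List String) (u : List String) (m : PySem.Dict String String) (k : Nat) :
    (PySem.List.enumerate u (k : Int)).foldl (fun m p =>
        if p.1 < (new.length : Int) then m.insert p.2 (PySem.List.pyGetD new p.1 "") else m) m
      = pvApplyIdx new m u k := by
  induction u generalizing m k with
  | nil => simp [PySem.List.enumerate, pvApplyIdx]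
  | cons t ts ih =>
    have h1 : PySem.List.enumerate (t :: ts) (k : Int) = ((k : Int), t) :: PySem.List.enumerate ts ((k : Int) + 1) := rfl
    rw [h1]
    simp only [List.foldl_cons]
    have h2 : ((k : Int) + 1) = ((k + 1 : Nat) : Int) := by push_cast; ring
    rw [h2, ih]
    have harg : (if ((k : Nat) : Int) < (new.length : Int) then m.insert t (PySem.List.pyGetD new ((k : Nat) : Int) "") else m)
        = (if k < new.length then m.insert t (new.getD k "") else m) := by
      by_cases h : k < new.length
      · have h' : ((k : Nat) : Int) < (new.length : Int) := by exact_mod_cast h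
        simp [h, h', PySem.List.pyGetD_natCast]
      · have h' : ¬ ((k : Nat) : Int) < (new.length : Int) := by exact_mod_cast h
        simp [h, h']
    rw [harg]
    conv_rhs => rw [pvApplyIdx]

theorem pvApplyIdx_append (new : List String) (m : PySem.Dict String String) (u : List String) (t : String) (j : Nat) :
    pvApplyIdx new m (u ++ [t]) j
      = (if j + u.length < new.length then
           (pvApplyIdx new m u j).insert t (new.getD (j + u.length) "")
         else pvApplyIdx new m u j) := by
  induction u generalizing m j with
  | nil => simp [pvApplyIdx]
  | cons s ss ih =>
    simp only [List.cons_append, pvApplyIdx, ih]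
    have h : j + 1 + ss.length = j + (s :: ss).length := by simp; omega
    rw [h]

theorem pvOfList_append_singleton {α : Type} [BEq α] (xs : List α) (t : α) :
    PySem.Set.ofList (xs ++ [t]) = (PySem.Set.ofList xs).add t := by
  simp [PySem.Set.ofList, List.foldl_append]

theorem pvMain (new : List String) (cachedD : PySem.Dict String String)
    (segs : List (List (String × String))) (ts : List String) :
    segs.foldl (fun (st : PySem.Dict String String × PySem.Set String × Nat) segment =>
        if (pvText segment != "") && !(cachedD.contains (pvText segment)) && !(st.2.1.contains (pvText segment)) then
          (if st.2.2 < new.length then st.1.insert (pvText segment) (new.getD st.2.2 "") else st.1,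
           st.2.1.add (pvText segment), st.2.2 + 1)
        else st)
      (pvApplyIdx new cachedD (PySem.Set.ofList ts) 0, PySem.Set.ofList ts, (PySem.Set.ofList ts).length)
    = (pvApplyIdx new cachedD (PySem.Set.ofList (ts ++ (segs.filter (pvP cachedD)).map pvText)) 0,
       PySem.Set.ofList (ts ++ (segs.filter (pvP cachedD)).map pvText),
       (PySem.Set.ofList (ts ++ (segs.filter (pvP cachedD)).map pvText)).length) := by
  induction segs generalizing ts with
  | nil => simp
  | cons seg rest ih =>
    simp only [List.foldl_cons]
    by_cases hg : pvP cachedD seg = true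
    · have hg' : ((pvText seg != "") && !(cachedD.contains (pvText seg))) = true := hg
      rw [List.filter_cons_of_pos hg]
      simp only [List.map_cons]
      rw [show ∀ l : List String, ts ++ pvText seg :: l = (ts ++ [pvText seg]) ++ l by intro l; simp]
      by_cases hs : (PySem.Set.ofList ts).contains (pvText seg) = true
      · -- already seen: B leaves the state unchanged, and the set does not grow
        have hset : PySem.Set.ofList (ts ++ [pvText seg]) = PySem.Set.ofList ts := by
          rw [pvOfList_append_singleton, PySem.Set.add, if_pos hs]
        have hcond : (((pvText seg != "") && !(cachedD.contains (pvText seg))) && !((PySem.Set.ofList ts).contains (pvText seg))) = false := by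
          rw [hs]
          simp
        rw [hcond]
        simp only [if_neg (by simp : ¬ (false = true))]
        have := ih (ts ++ [pvText seg])
        rw [hset] at this
        exact this
      · -- new unique text: B assigns now, A assigns at the same index
        have hsf : (PySem.Set.ofList ts).contains (pvText seg) = false := by simpa using hs
        have hadd : (PySem.Set.ofList ts).add (pvText seg) = PySem.Set.ofList ts ++ [pvText seg] := by
          rw [PySem.Set.add, if_neg hs]
        have hset : PySem.Set.ofList (ts ++ [pvText seg]) = PySem.Set.ofList ts ++ [pvText seg] := by
          rw [pvOfList_append_singleton, hadd]
        have hcond : (((pvText seg != "") && !(cachedD.contains (pvText seg))) && !((PySem.Set.ofList ts).contains (pvText seg))) = true := by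
          rw [hg', hsf]
          simp
        rw [hcond]
        have hstate :
            ((if (PySem.Set.ofList ts).length < new.length then
                (pvApplyIdx new cachedD (PySem.Set.ofList ts) 0).insert (pvText seg) (new.getD (PySem.Set.ofList ts).length "")
              else pvApplyIdx new cachedD (PySem.Set.ofList ts) 0),
             (PySem.Set.ofList ts).add (pvText seg), (PySem.Set.ofList ts).length + 1)
            = (pvApplyIdx new cachedD (PySem.Set.ofList (ts ++ [pvText seg])) 0,
               PySem.Set.ofList (ts ++ [pvText seg]),
               (PySem.Set.ofList (ts ++ [pvText seg])).length) := by
          rw [hset, pvApplyIdx_append]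
          simp [hadd]
        rw [hstate]
        exact ih (ts ++ [pvText seg])
    · -- filtered out: both sides skip this segment
      have hgf : pvP cachedD seg = false := by simpa using hg
      rw [List.filter_cons_of_neg (by simp [hgf])]
      have hcond : (((pvText seg != "") && !(cachedD.contains (pvText seg))) && !((PySem.Set.ofList ts).contains (pvText seg))) = false := by
        have h2 : ((pvText seg != "") && !(cachedD.contains (pvText seg))) = false := hgf
        rw [h2]
        simp
      rw [hcond]
      simp only [if_neg (by simp : ¬ (false = true))]
      exact ih ts

theorem pvLemA (segments : List (List (String × String))) (cached : List (String × String)) (new : List String) :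
    create_translation_mapping segments cached new
      = (pvApplyIdx new (PySem.Dict.ofList cached)
           (PySem.Set.ofList ((segments.filter (pvP (PySem.Dict.ofList cached))).map pvText)) 0).items := by
  show ((PySem.List.enumerate (PySem.List.dedup (segments.foldl (fun acc segment =>
          if (pvText segment != "") && !((PySem.Dict.ofList cached).contains (pvText segment)) then
            acc ++ [pvText segment] else acc) []))).foldl (fun m p =>
            if p.1 < (new.length : Int) then m.insert p.2 (PySem.List.pyGetD new p.1 "") else m)
          (PySem.Dict.ofList cached)).items = _
  rw [show (fun (acc : List String) segment =>
        if (pvText segment != "") && !((PySem.Dict.ofList cached).contains (pvText segment)) then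
          acc ++ [pvText segment] else acc)
      = (fun (acc : List String) x =>
        if pvP (PySem.Dict.ofList cached) x = true then acc ++ [pvText x] else acc) from rfl]
  rw [PySem.List.foldl_append_if (pvP (PySem.Dict.ofList cached)) pvText segments []]
  rw [show PySem.List.dedup ([] ++ (segments.filter (pvP (PySem.Dict.ofList cached))).map pvText)
        = PySem.Set.ofList ((segments.filter (pvP (PySem.Dict.ofList cached))).map pvText) by simp [PySem.List.dedup]]
  rw [show ((0 : Int)) = ((0 : Nat) : Int) from rfl] at *
  rw [pvEnum_foldl]

theorem pvLemB (segments : List (List (String × String))) (cached : List (String × String)) (new : List String) :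
    create_translation_mapping_alt segments cached new
      = (pvApplyIdx new (PySem.Dict.ofList cached)
           (PySem.Set.ofList ((segments.filter (pvP (PySem.Dict.ofList cached))).map pvText)) 0).items := by
  show (segments.foldl (fun (st : PySem.Dict String String × PySem.Set String × Nat) segment =>
          if (pvText segment != "") && !((PySem.Dict.ofList cached).contains (pvText segment)) && !(st.2.1.contains (pvText segment)) then
            (if st.2.2 < new.length then st.1.insert (pvText segment) (new.getD st.2.2 "") else st.1,
             st.2.1.add (pvText segment), st.2.2 + 1)
          else st)
        (pvApplyIdx new (PySem.Dict.ofList cached) (PySem.Set.ofList ([] : List String)) 0,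
         PySem.Set.ofList ([] : List String), (PySem.Set.ofList ([] : List String)).length)).1.items = _
  rw [pvMain]
  simp

-- ===== VERDICT (by name: the statement is the Claim_ definition above) =====
theorem create_translation_mapping_spec : Claim_equal_create_translation_mapping := by
  intro segments cached new _
  show create_translation_mapping segments cached new = create_translation_mapping_alt segments cached new
  rw [pvLemA, pvLemB]
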